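-- pv_equiv track=rewrite | github.com/iandioch/solutions | kattis/fruitbaskets/solution.py | find_invalid_combos
-- ===== SOURCE A (Python) =====
-- def find_invalid_combos(weights, curr_included, curr, tot):
--     if curr == len(weights) or curr_included == 4:
--         if tot < 200:
--             return tot
--         return 0
--     ans = find_invalid_combos(weights, curr_included+1, curr+1, tot+weights[curr])
--     ans += find_invalid_combos(weights, curr_included, curr+1, tot)
--     return ans
-- ===== SOURCE B (Python) =====
-- def find_invalid_combos(weights, curr_included, curr, tot):
--     # Bottom-up DP: counts of (items-included, running-total) states instead of A's O(n^4) branching recursion.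
--     if curr_included == 4:
--         return tot if tot < 200 else 0
--     counts = {(curr_included, tot): 1}
--     for i in range(curr, len(weights)):
--         w = weights[i]
--         new = dict(counts)
--         for (c, s), m in counts.items():
--             if c != 4:
--                 key = (c + 1, s + w)
--                 new[key] = new.get(key, 0) + m
--         counts = new
--     return sum(s * m for (c, s), m in counts.items() if s < 200)
-- ===== Notes on version B (the rewrite author's own statement) =====
-- stated objective: alternative
-- what changed: Replaces A's top-down binary recursion over include/exclude decisions (one leaf per subset of size <= 4) by a single bottom-up pass that maintains a dictionary of (count-included, running-total) states with multiplicities and sums s*m over states with s < 200 at the end.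
import Mathlib
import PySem

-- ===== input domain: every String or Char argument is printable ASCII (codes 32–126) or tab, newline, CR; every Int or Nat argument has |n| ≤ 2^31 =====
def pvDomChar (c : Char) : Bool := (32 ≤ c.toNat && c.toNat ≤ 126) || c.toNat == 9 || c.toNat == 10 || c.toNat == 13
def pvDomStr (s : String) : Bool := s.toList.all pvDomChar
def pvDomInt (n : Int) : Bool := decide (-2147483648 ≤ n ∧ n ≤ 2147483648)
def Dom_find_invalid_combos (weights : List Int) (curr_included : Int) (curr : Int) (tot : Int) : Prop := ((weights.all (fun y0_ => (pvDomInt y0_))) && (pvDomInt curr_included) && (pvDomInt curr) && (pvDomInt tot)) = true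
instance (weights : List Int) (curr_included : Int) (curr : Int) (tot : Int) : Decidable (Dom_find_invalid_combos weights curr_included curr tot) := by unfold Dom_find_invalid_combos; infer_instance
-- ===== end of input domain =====

-- B replaces A's top-down include/exclude branching recursion by a bottom-up pass over a
-- table of (count-included, running-total) state multiplicities (objective: alternative).

-- ===== PORT A =====
def find_invalid_combos (weights : List Int) (curr_included : Int) (curr : Int) (tot : Int) : Int :=
  if curr = (weights.length : Int) ∨ curr_included = 4 then
    if tot < 200 then tot else 0
  else
    match h : PySem.List.pyGet? weights curr with
    | none => 0  -- Python raises IndexError at weights[curr]; Pre_ excludes these inputs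
    | some w =>
      find_invalid_combos weights (curr_included + 1) (curr + 1) (tot + w) +
      find_invalid_combos weights curr_included (curr + 1) tot
termination_by ((weights.length : Int) - curr).toNat
decreasing_by
  all_goals
  · have hin : PySem.Raise.InRange weights.length curr := by
      by_contra hc
      rw [(PySem.List.pyGet?_eq_none_iff weights curr).mpr hc] at h
      cases h
    have hlt : curr < (weights.length : Int) := by
      simp [PySem.Raise.InRange] at hin
      omega
    omega

-- ===== PORT B =====
def find_invalid_combos_alt (weights : List Int) (curr_included : Int) (curr : Int) (tot : Int) : Int :=
  if curr_included = 4 then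
    (if tot < 200 then tot else 0)
  else
    let counts :=
      (PySem.List.pyRange curr (weights.length : Int) 1).foldl
        (fun counts i =>
          let w := PySem.List.pyGetD weights i 0
          counts.items.foldl
            (fun nd p =>
              if p.1.1 ≠ 4 then
                nd.insert (p.1.1 + 1, p.1.2 + w) (nd.getD (p.1.1 + 1, p.1.2 + w) 0 + p.2)
              else nd)
            counts)
        ((PySem.Dict.empty : PySem.Dict (Int × Int) Int).insert (curr_included, tot) 1)
    (counts.items.map (fun p => if p.1.2 < 200 then p.1.2 * p.2 else 0)).sum

-- ===== PRECONDITION & SPEC =====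
-- Pre_ excludes exactly the inputs where Python A raises IndexError at weights[curr]
-- (curr out of range [-len, len] with curr_included ≠ 4); everywhere A returns, Pre_ holds.
def Pre_find_invalid_combos (weights : List Int) (curr_included : Int) (curr : Int) (tot : Int) : Prop :=
  curr_included = 4 ∨ (-(weights.length : Int) ≤ curr ∧ curr ≤ (weights.length : Int))
instance (weights : List Int) (curr_included : Int) (curr : Int) (tot : Int) : Decidable (Pre_find_invalid_combos weights curr_included curr tot) := by unfold Pre_find_invalid_combos; infer_instance
def pvWitness_find_invalid_combos : List Int × Int × Int × Int := ([150, 30, 40], 0, 0, 0)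

def Spec_find_invalid_combos (weights : List Int) (curr_included : Int) (curr : Int) (tot : Int) (out : Int) : Prop := out = find_invalid_combos_alt weights curr_included curr tot
instance (weights : List Int) (curr_included : Int) (curr : Int) (tot : Int) (out : Int) : Decidable (Spec_find_invalid_combos weights curr_included curr tot out) := by unfold Spec_find_invalid_combos; infer_instance

-- ===== CLAIM (what is proved, stated in full; the proofs are below) =====
def Claim_equal_find_invalid_combos : Prop := ∀ (weights : List Int) (curr_included : Int) (curr : Int) (tot : Int), Dom_find_invalid_combos weights curr_included curr tot → Pre_find_invalid_combos weights curr_included curr tot → Spec_find_invalid_combos weights curr_included curr tot (find_invalid_combos weights curr_included curr tot)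

-- ===== LEMMAS AND PROOFS =====

-- Python's `tot if tot < 200 else 0` at a leaf of A's recursion.
def pvF200 (t : Int) : Int := if t < 200 then t else 0

-- A's recursion rephrased structurally over the list of remaining elements.
def pvF : List Int → Int → Int → Int
  | [], _, t => pvF200 t
  | w :: r, c, t => if c = 4 then pvF200 t else pvF r (c + 1) (t + w) + pvF r c t

theorem pvF_four (l : List Int) (t : Int) : pvF l 4 t = pvF200 t := by
  cases l <;> simp [pvF]

-- The elements A's recursion visits from position curr on (negative curr included).
def pvEff (weights : List Int) (curr : Int) : List Int :=
  (PySem.List.pyRange curr (weights.length : Int) 1).map (fun i => PySem.List.pyGetD weights i 0)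

theorem pvGet_some_getD (xs : List Int) (i : Int)
    (h1 : -(xs.length : Int) ≤ i) (h2 : i < (xs.length : Int)) :
    PySem.List.pyGet? xs i = some (PySem.List.pyGetD xs i 0) := by
  cases h : PySem.List.pyGet? xs i with
  | none =>
    rw [PySem.List.pyGet?_eq_none_iff] at h
    simp [PySem.Raise.InRange] at h
    omega
  | some w => simp [PySem.List.pyGetD, h]

theorem pvA_eq (weights : List Int) : ∀ (n : ℕ) (curr curr_included tot : Int),
    ((weights.length : Int) - curr).toNat = n →
    -(weights.length : Int) ≤ curr → curr ≤ (weights.length : Int) →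
    find_invalid_combos weights curr_included curr tot = pvF (pvEff weights curr) curr_included tot := by
  intro n
  induction n with
  | zero =>
    intro curr ci tot hn hl hr
    have hcl : curr = (weights.length : Int) := by omega
    rw [find_invalid_combos, if_pos (Or.inl hcl)]
    rw [pvEff, PySem.List.pyRange_one_eq_nil (by omega), List.map_nil]
    simp [pvF, pvF200]
  | succ n ih =>
    intro curr ci tot hn hl hr
    have hlt : curr < (weights.length : Int) := by omega
    have heff : pvEff weights curr
        = PySem.List.pyGetD weights curr 0 :: pvEff weights (curr + 1) := by
      rw [pvEff, PySem.List.pyRange_one_cons hlt, List.map_cons]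
      rfl
    by_cases h4 : ci = 4
    · rw [find_invalid_combos, if_pos (Or.inr h4), heff, h4, pvF_four]
      simp [pvF200]
    · rw [find_invalid_combos, if_neg (by rintro (h | h) <;> [omega; exact h4 h])]
      have hget := pvGet_some_getD weights curr hl hlt
      split
      · rename_i heq
        rw [hget] at heq
        cases heq
      · rename_i w heq
        rw [hget] at heq
        injection heq with hw
        subst hw
        rw [heff, pvF, if_neg h4]
        rw [ih (curr + 1) (ci + 1) (tot + PySem.List.pyGetD weights curr 0) (by omega) (by omega) (by omega),
            ih (curr + 1) ci tot (by omega) (by omega) (by omega)]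


-- B's state-update for one element w (the inner loop of Source B).
def pvStep (w : Int) (d : PySem.Dict (Int × Int) Int) : PySem.Dict (Int × Int) Int :=
  d.items.foldl
    (fun nd p =>
      if p.1.1 ≠ 4 then
        nd.insert (p.1.1 + 1, p.1.2 + w) (nd.getD (p.1.1 + 1, p.1.2 + w) 0 + p.2)
      else nd)
    d

-- Source B's final sum over the state table.
def pvVal (d : PySem.Dict (Int × Int) Int) : Int :=
  (d.items.map (fun p => if p.1.2 < 200 then p.1.2 * p.2 else 0)).sum

-- The loop invariant quantity: total of m * pvF l c s over all states.
def pvT (l : List Int) (d : PySem.Dict (Int × Int) Int) : Int :=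
  (d.items.map (fun p => p.2 * pvF l p.1.1 p.1.2)).sum

theorem pvB_eq (weights : List Int) (curr_included curr tot : Int) (h4 : curr_included ≠ 4) :
    find_invalid_combos_alt weights curr_included curr tot
      = pvVal ((pvEff weights curr).foldl (fun d w => pvStep w d)
          ((PySem.Dict.empty : PySem.Dict (Int × Int) Int).insert (curr_included, tot) 1)) := by
  rw [find_invalid_combos_alt, if_neg h4, pvEff, List.foldl_map]
  rfl

theorem pvList_replace (g : Int × Int → Int) (k : Int × Int) (v : Int) :
    ∀ (l : List ((Int × Int) × Int)) (v0 : Int), (l.map Prod.fst).Nodup → (k, v0) ∈ l →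
    ((l.map (fun p => if p.1 == k then (k, v) else p)).map (fun p => p.2 * g p.1)).sum
      = (l.map (fun p => p.2 * g p.1)).sum + v * g k - v0 * g k := by
  intro l
  induction l with
  | nil => intro v0 _ hm; cases hm
  | cons p rest ih =>
    intro v0 hnd hm
    simp only [List.map_cons, List.nodup_cons] at hnd
    by_cases hp : p.1 = k
    · -- head has key k; then k ∉ keys of rest, so (k,v0) must be the head
      have hrest : ∀ q ∈ rest, q.1 ≠ k := by
        intro q hq hqk
        refine hnd.1 ?_; rw [hp, ← hqk]; exact List.mem_map.mpr ⟨q, hq, rfl⟩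
      have hm' : p = (k, v0) := by
        rcases List.mem_cons.mp hm with h | h
        · exact h.symm
        · exact absurd rfl (hrest _ h)
      have hid : rest.map (fun p => if p.1 == k then (k, v) else p) = rest := by
        rw [List.map_congr_left (fun q hq => by rw [if_neg (by simp [hrest q hq])])]; exact List.map_id' rest
      simp only [List.map_cons, hid, List.sum_cons]
      rw [hm']
      simp only [beq_self_eq_true, if_true]
      ring
    · have hm' : (k, v0) ∈ rest := by
        rcases List.mem_cons.mp hm with h | h
        · exact absurd (by rw [← h]) hp
        · exact h
      have hif : (if (p.1 == k) = true then (k, v) else p) = p := by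
        rw [if_neg]
        simp only [beq_iff_eq]
        exact hp
      simp only [List.map_cons, List.sum_cons, hif]
      rw [ih v0 hnd.2 hm']
      ring

theorem pvSum_insert (g : Int × Int → Int) (d : PySem.Dict (Int × Int) Int) (k : Int × Int)
    (m : Int) (hnd : d.keys.Nodup) :
    ((d.insert k (d.getD k 0 + m)).items.map (fun p => p.2 * g p.1)).sum
      = (d.items.map (fun p => p.2 * g p.1)).sum + m * g k := by
  have hkeys : d.keys = d.items.map Prod.fst := by
    simp [PySem.Dict.keys]
  by_cases hc : d.contains k
  · -- k present: the entry with key k is overwritten in place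
    have hk : k ∈ d.keys := (PySem.Dict.contains_iff_mem_keys d k).mp hc
    rw [hkeys] at hk
    obtain ⟨p, hp, hpk⟩ := List.mem_map.mp hk
    obtain ⟨k', v0⟩ := p
    simp at hpk
    rw [hpk] at hp
    have hget : d.getD k 0 = v0 := PySem.Dict.getD_of_mem_items d hp hnd 0
    rw [PySem.Dict.items_insert_of_contains _ _ hc,
        pvList_replace g k (d.getD k 0 + m) d.items v0 (hkeys ▸ hnd) hp, hget]
    ring
  · rw [PySem.Dict.items_insert_of_not_contains _ _ (by simpa using hc),
        PySem.Dict.getD_of_not_contains _ _ (by simpa using hc)]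
    simp

theorem pvFold_entries (L : List Int) (w : Int) :
    ∀ (entries : List ((Int × Int) × Int)) (nd : PySem.Dict (Int × Int) Int), nd.keys.Nodup →
    (entries.foldl (fun nd p =>
        if p.1.1 ≠ 4 then
          nd.insert (p.1.1 + 1, p.1.2 + w) (nd.getD (p.1.1 + 1, p.1.2 + w) 0 + p.2)
        else nd) nd).keys.Nodup ∧
    pvT L (entries.foldl (fun nd p =>
        if p.1.1 ≠ 4 then
          nd.insert (p.1.1 + 1, p.1.2 + w) (nd.getD (p.1.1 + 1, p.1.2 + w) 0 + p.2)
        else nd) nd)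
      = pvT L nd
        + (entries.map (fun p => if p.1.1 ≠ 4 then p.2 * pvF L (p.1.1 + 1) (p.1.2 + w) else 0)).sum := by
  intro entries
  induction entries with
  | nil => intro nd hnd; exact ⟨hnd, by simp⟩
  | cons p rest ih =>
    intro nd hnd
    by_cases h4 : p.1.1 = 4
    · simp only [List.foldl_cons, if_neg (not_not_intro h4), List.map_cons, List.sum_cons]
      obtain ⟨h1, h2⟩ := ih nd hnd
      exact ⟨h1, by rw [h2]; ring⟩
    · simp only [List.foldl_cons, if_pos h4, List.map_cons, List.sum_cons]
      set k := (p.1.1 + 1, p.1.2 + w) with hk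
      obtain ⟨h1, h2⟩ := ih (nd.insert k (nd.getD k 0 + p.2))
        (PySem.Dict.nodup_keys_insert _ _ _ hnd)
      refine ⟨h1, ?_⟩
      rw [h2]
      have hins := pvSum_insert (fun q => pvF L q.1 q.2) nd k p.2 hnd
      have hT : pvT L (nd.insert k (nd.getD k 0 + p.2))
          = pvT L nd + p.2 * pvF L (p.1.1 + 1) (p.1.2 + w) := hins
      rw [hT]
      ring

theorem pvCore (l : List Int) : ∀ (d : PySem.Dict (Int × Int) Int), d.keys.Nodup →
    pvVal (l.foldl (fun d w => pvStep w d) d) = pvT l d := by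
  induction l with
  | nil =>
    intro d _
    rw [List.foldl_nil, pvVal, pvT]
    rw [List.map_congr_left (fun p (_ : p ∈ d.items) => ?_)]
    show (if p.1.2 < 200 then p.1.2 * p.2 else 0) = p.2 * pvF [] p.1.1 p.1.2
    simp only [pvF, pvF200]
    split <;> ring
  | cons w l ih =>
    intro d hnd
    rw [List.foldl_cons]
    obtain ⟨h1, h2⟩ := pvFold_entries l w d.items d hnd
    rw [ih (pvStep w d) h1]
    show pvT l (pvStep w d) = pvT (w :: l) d
    rw [pvStep, h2]
    conv_rhs => rw [pvT]
    have hpt : ∀ p ∈ d.items, (fun (p : (Int × Int) × Int) => p.2 * pvF (w :: l) p.1.1 p.1.2) p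
        = (fun (p : (Int × Int) × Int) => p.2 * pvF l p.1.1 p.1.2
            + (if p.1.1 ≠ 4 then p.2 * pvF l (p.1.1 + 1) (p.1.2 + w) else 0)) p := by
      intro p _
      by_cases h4 : p.1.1 = 4
      · simp [pvF, h4, pvF_four]
      · simp only [pvF, if_neg h4, if_pos h4]
        ring
    rw [List.map_congr_left hpt, PySem.List.sum_map_add_int, pvT]

theorem pvD0_nodup (curr_included tot : Int) :
    ((PySem.Dict.empty : PySem.Dict (Int × Int) Int).insert (curr_included, tot) 1).keys.Nodup :=
  PySem.Dict.nodup_keys_insert _ _ _ PySem.Dict.nodup_keys_empty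

theorem pvD0_items (curr_included tot : Int) :
    ((PySem.Dict.empty : PySem.Dict (Int × Int) Int).insert (curr_included, tot) 1).items
      = [((curr_included, tot), 1)] := by
  rw [PySem.Dict.items_insert_of_not_contains]
  · simp [PySem.Dict.empty]
  · simp

theorem pvT_D0 (l : List Int) (curr_included tot : Int) :
    pvT l ((PySem.Dict.empty : PySem.Dict (Int × Int) Int).insert (curr_included, tot) 1)
      = pvF l curr_included tot := by
  rw [pvT, pvD0_items]
  simp

-- ===== VERDICT (by name: the statement is the Claim_ definition above) =====
theorem find_invalid_combos_spec : Claim_equal_find_invalid_combos := by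
  intro weights curr_included curr tot _ hpre
  unfold Spec_find_invalid_combos
  by_cases h4 : curr_included = 4
  · subst h4
    rw [find_invalid_combos, find_invalid_combos_alt]
    simp
  · rcases hpre with h | ⟨hl, hr⟩
    · exact absurd h h4
    · rw [pvB_eq weights curr_included curr tot h4,
        pvCore (pvEff weights curr) _ (pvD0_nodup curr_included tot),
        pvT_D0, pvA_eq weights ((weights.length : Int) - curr).toNat curr curr_included tot rfl hl hr]
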